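-- pv_equiv track=rewrite | github.com/bakdata/kpops | kpops/utils/docstring.py | _trim_description_end
-- ===== SOURCE A (Python) =====
-- def _trim_description_end(desc: str) -> str:
--     """Remove the unwanted text that comes after a description in a docstring.
--
--     Also removes all whitespaces and newlines and replaces them with a single space.
--
--     A description is defined here as a string of text written in natural language.
--     A description ends at the occurence of a separator such as ``returns``.
--
--     **Works only with reStructuredText docstrings.**
--
--     :param desc: Description to be isolated, only the end will be trimmed
--     :returns: Isolated description
--     """
--     desc_enders = [
--         ":param ",
--         ":returns:",
--         ":raises:",
--         "defaults to ",
--     ]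
--     end_index = len(desc)
--     for desc_ender in desc_enders:
--         if (desc_ender in desc) and (desc.index(desc_ender) < end_index):
--             end_index = desc.index(desc_ender)
--     desc_split = desc[:end_index].split()
--     for line in desc_split:
--         line = line.rstrip()
--     desc = " ".join(desc_split)
--     return desc.rstrip(",").rstrip()
-- ===== SOURCE B (Python) =====
-- def _trim_description_end(desc: str) -> str:
--     """Single left-to-right scan: cut at the first position where any RST
--     separator starts, then clean up at the token level."""
--     seps = (":param ", ":returns:", ":raises:", "defaults to ")
--     prefix = desc
--     for i in range(len(desc)):
--         if desc.startswith(seps, i):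
--             prefix = desc[:i]
--             break
--     tokens = prefix.split()
--     if tokens:
--         tokens[-1] = tokens[-1].rstrip(",")
--         if not tokens[-1]:
--             tokens.pop()
--     return " ".join(tokens)
-- ===== Notes on version B (the rewrite author's own statement) =====
-- stated objective: alternative
-- what changed: Replaces the four separate substring searches with a running-minimum index by a single left-to-right scan that stops at the first position where any separator starts, and replaces the whole-string two-stage right-strip cleanup by token-level cleanup (strip trailing comma characters off the last token, dropping it if it becomes empty), so the dead per-line loop disappears.
import Mathlib
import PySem

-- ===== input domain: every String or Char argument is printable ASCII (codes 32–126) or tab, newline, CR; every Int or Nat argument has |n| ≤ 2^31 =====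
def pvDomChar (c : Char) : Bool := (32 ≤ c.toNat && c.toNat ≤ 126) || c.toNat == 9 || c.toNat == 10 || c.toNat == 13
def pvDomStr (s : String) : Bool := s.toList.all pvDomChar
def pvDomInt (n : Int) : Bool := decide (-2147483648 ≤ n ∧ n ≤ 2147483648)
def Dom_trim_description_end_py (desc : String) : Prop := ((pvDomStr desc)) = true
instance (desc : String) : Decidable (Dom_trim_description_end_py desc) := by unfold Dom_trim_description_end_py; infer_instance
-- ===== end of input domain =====

-- B replaces A's four substring searches (running-minimum index) by one left-to-right scan
-- stopping at the first position where any separator starts, and does the final cleanup at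
-- token level instead of A's whole-string rstrip(",").rstrip(); objective: alternative.

-- ===== PORT A =====
-- one step of A's 'for desc_ender in desc_enders' running-minimum loop
def pvStepA (cs : List Char) (ei : Int) (e : List Char) : Int :=
  if PySem.Chars.isIn e cs = true ∧ PySem.Chars.find cs e < ei then PySem.Chars.find cs e else ei

-- desc.rstrip(",") : single-char rstrip, ported by hand (exact: drops trailing ',' characters)
def pvRstripComma (cs : List Char) : List Char :=
  (cs.reverse.dropWhile (· == ',')).reverse

def trim_description_end_py (desc : String) : String :=
  let cs := desc.toList
  let desc_enders : List (List Char) :=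
    [(":param ").toList, (":returns:").toList, (":raises:").toList, ("defaults to ").toList]
  let end_index : Int := desc_enders.foldl (pvStepA cs) (cs.length : Int)
  let desc_split := PySem.Chars.split₀ (PySem.List.slice cs none (some end_index))
  -- Python's 'for line in desc_split: line = line.rstrip()' rebinds a local and has no effect
  let _ := desc_split.map PySem.Chars.rstrip
  String.ofList (PySem.Chars.rstrip (pvRstripComma (PySem.Chars.join [' '] desc_split)))

-- ===== PORT B =====
def pvSeps : List (List Char) :=
  [(":param ").toList, (":returns:").toList, (":raises:").toList, ("defaults to ").toList]

-- B's scan: 'for i in range(len(desc)): if desc.startswith(seps, i): prefix = desc[:i]; break'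
def pvBScan (es : List (List Char)) : List Char → List Char
  | [] => []
  | c :: r =>
    if es.any (fun e => PySem.Chars.startswith (c :: r) e) then []
    else c :: pvBScan es r

def trim_description_end_py_alt (desc : String) : String :=
  let prefixCs := pvBScan pvSeps desc.toList
  let tokens := PySem.Chars.split₀ prefixCs
  let tokens :=
    match tokens.getLast? with
    | none => tokens
    | some last =>
      let last' := (last.reverse.dropWhile (· == ',')).reverse   -- tokens[-1].rstrip(",")
      if last' = [] then tokens.dropLast else tokens.dropLast ++ [last']
  String.ofList (PySem.Chars.join [' '] tokens)

-- ===== PRECONDITION & SPEC =====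
def Spec_trim_description_end_py (desc : String) (out : String) : Prop := out = trim_description_end_py_alt desc
instance (desc : String) (out : String) : Decidable (Spec_trim_description_end_py desc out) := by unfold Spec_trim_description_end_py; infer_instance

-- ===== CLAIM (what is proved, stated in full; the proofs are below) =====
def Claim_equal_trim_description_end_py : Prop := ∀ (desc : String), Dom_trim_description_end_py desc → Spec_trim_description_end_py desc (trim_description_end_py desc)

-- ===== LEMMAS AND PROOFS =====

-- first index at which some separator starts (cs.length if none)
def pvFirstHit (es : List (List Char)) : List Char → Nat
  | [] => 0
  | c :: r =>
    if es.any (fun e => PySem.Chars.startswith (c :: r) e) then 0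
    else pvFirstHit es r + 1

theorem pvBScan_eq_take (es : List (List Char)) (cs : List Char) :
    pvBScan es cs = cs.take (pvFirstHit es cs) := by
  induction cs with
  | nil => rfl
  | cons c r ih =>
    simp only [pvBScan, pvFirstHit]
    split_ifs with h
    · simp
    · simp [ih]

theorem pvFirstHit_le (es : List (List Char)) (cs : List Char) :
    pvFirstHit es cs ≤ cs.length := by
  induction cs with
  | nil => simp [pvFirstHit]
  | cons c r ih =>
    simp only [pvFirstHit]
    split_ifs with h
    · simp
    · simpa using ih

theorem pvFirstHit_not_before (es : List (List Char)) (cs : List Char) :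
    ∀ j < pvFirstHit es cs, es.any (fun e => PySem.Chars.startswith (cs.drop j) e) = false := by
  induction cs with
  | nil => simp [pvFirstHit]
  | cons c r ih =>
    intro j hj
    simp only [pvFirstHit] at hj
    split_ifs at hj with h
    · omega
    · cases j with
      | zero => simpa using h
      | succ j' => simpa using ih j' (by omega)

theorem pvFirstHit_hit (es : List (List Char)) (cs : List Char)
    (h : pvFirstHit es cs < cs.length) :
    es.any (fun e => PySem.Chars.startswith (cs.drop (pvFirstHit es cs)) e) = true := by
  induction cs with
  | nil => simp at h
  | cons c r ih =>
    simp only [pvFirstHit] at h ⊢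
    split_ifs at h ⊢ with hh
    · simpa using hh
    · simp only [List.drop_succ_cons]
      exact ih (by simp only [List.length_cons] at h; omega)

theorem pvRunMin_le (cs : List Char) : ∀ (es : List (List Char)) (ei : Int),
    es.foldl (pvStepA cs) ei ≤ ei := by
  intro es
  induction es with
  | nil => simp
  | cons e rest ih =>
    intro ei
    simp only [List.foldl_cons]
    refine le_trans (ih _) ?_
    unfold pvStepA
    split_ifs with h
    · exact le_of_lt h.2
    · exact le_refl _

theorem pvRunMin_le_find (cs : List Char) : ∀ (es : List (List Char)) (ei : Int)
    (e : List Char), e ∈ es → PySem.Chars.isIn e cs = true →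
    es.foldl (pvStepA cs) ei ≤ PySem.Chars.find cs e := by
  intro es
  induction es with
  | nil => simp
  | cons e0 rest ih =>
    intro ei e he hin
    simp only [List.foldl_cons]
    rcases List.mem_cons.mp he with rfl | he'
    · refine le_trans (pvRunMin_le cs rest _) ?_
      unfold pvStepA
      split_ifs with h
      · exact le_refl _
      · push Not at h
        exact h hin
    · exact ih _ e he' hin

theorem pvRunMin_cases (cs : List Char) : ∀ (es : List (List Char)) (ei : Int),
    es.foldl (pvStepA cs) ei = ei ∨
    ∃ e ∈ es, PySem.Chars.isIn e cs = true ∧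
      es.foldl (pvStepA cs) ei = PySem.Chars.find cs e := by
  intro es
  induction es with
  | nil => intro ei; left; rfl
  | cons e0 rest ih =>
    intro ei
    simp only [List.foldl_cons]
    rcases ih (pvStepA cs ei e0) with h | ⟨e, he, hin, heq⟩
    · rw [h]
      unfold pvStepA
      split_ifs with hc
      · exact Or.inr ⟨e0, List.mem_cons_self, hc.1, rfl⟩
      · exact Or.inl rfl
    · exact Or.inr ⟨e, List.mem_cons_of_mem _ he, hin, heq⟩

-- A's end_index equals the first-hit position, as an Int
theorem pvEndIndex_eq (es : List (List Char)) (cs : List Char) :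
    es.foldl (pvStepA cs) (cs.length : Int) = (pvFirstHit es cs : Int) := by
  set M : Int := es.foldl (pvStepA cs) (cs.length : Int) with hM
  have hle : M ≤ (cs.length : Int) := pvRunMin_le cs es _
  have h0 : 0 ≤ M := by
    rcases pvRunMin_cases cs es (cs.length : Int) with h | ⟨e, _, hin, heq⟩
    · rw [← hM] at h; rw [h]; positivity
    · rw [← hM] at heq; rw [heq]
      exact (PySem.Chars.find_nonneg_iff _ _).mpr ((PySem.Chars.isIn_iff_infix _ _).mp hin)
  set F : Nat := pvFirstHit es cs with hF
  rcases lt_trichotomy M (F : Int) with hlt | heq | hgt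
  · -- M < F : a separator is a prefix at cs.drop M.toNat, contradicting runMin minimality… actually
    -- M < F: pvFirstHit_not_before at M.toNat says no hit there, but runMin points at a find or len
    exfalso
    rcases pvRunMin_cases cs es (cs.length : Int) with h | ⟨e, he, hin, heqf⟩
    · rw [← hM] at h
      have : F ≤ cs.length := pvFirstHit_le es cs
      omega
    · rw [← hM] at heqf
      have hfind0 : 0 ≤ PySem.Chars.find cs e := by rw [← heqf]; exact h0
      have hpre := (PySem.Chars.find_spec hfind0).1
      have hhit : es.any (fun e' => PySem.Chars.startswith (cs.drop M.toNat) e') = true := by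
        refine List.any_eq_true.mpr ⟨e, he, ?_⟩
        rw [heqf]
        exact (PySem.Chars.startswith_iff _ _).mpr hpre
      have := pvFirstHit_not_before es cs M.toNat (by omega)
      rw [this] at hhit
      exact Bool.false_ne_true hhit
  · exact heq
  · -- F < M : there is a hit at F, so some find ≤ F < M, contradicting runMin ≤ find
    exfalso
    have hFlt : F < cs.length := by omega
    have hhit := pvFirstHit_hit es cs hFlt
    rcases List.any_eq_true.mp hhit with ⟨e, he, hsw⟩
    have hpre : e <+: cs.drop F := (PySem.Chars.startswith_iff _ _).mp hsw
    have hinf : e <:+: cs := hpre.isInfix.trans (List.drop_suffix F cs).isInfix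
    have hin : PySem.Chars.isIn e cs = true := (PySem.Chars.isIn_iff_infix _ _).mpr hinf
    have hMle : M ≤ PySem.Chars.find cs e := pvRunMin_le_find cs es _ e he hin
    have hfind0 : 0 ≤ PySem.Chars.find cs e := le_trans h0 hMle
    have hfle : PySem.Chars.find cs e ≤ (F : Int) := by
      by_contra hc
      push Not at hc
      have := (PySem.Chars.find_spec hfind0).2 F (by omega)
      exact this hpre
    omega

-- the split₀ tokens are nonempty and whitespace-free
theorem pvSplit₀_go_toks (s : List Char) : ∀ (cur : List Char) (acc : List (List Char)),
    (∀ c ∈ cur, PySem.Chars.isspace c = false) →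
    (∀ t ∈ acc, t ≠ [] ∧ ∀ c ∈ t, PySem.Chars.isspace c = false) →
    ∀ t ∈ PySem.Chars.split₀.go s cur acc, t ≠ [] ∧ ∀ c ∈ t, PySem.Chars.isspace c = false := by
  induction s with
  | nil =>
    intro cur acc hcur hacc t ht
    simp only [PySem.Chars.split₀.go] at ht
    split_ifs at ht with h
    · exact hacc t (by simpa using ht)
    · simp only [List.mem_reverse, List.mem_cons] at ht
      rcases ht with rfl | ht
      · constructor
        · simpa using fun hnil => h (by simp [hnil])
        · intro c hc; exact hcur c (List.mem_reverse.mp hc)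
      · exact hacc t ht
  | cons c rest ih =>
    intro cur acc hcur hacc t ht
    simp only [PySem.Chars.split₀.go] at ht
    split_ifs at ht with h1 h2
    · exact ih [] acc (by simp) hacc t ht
    · refine ih [] (cur.reverse :: acc) (by simp) ?_ t ht
      intro t' ht'
      rcases List.mem_cons.mp ht' with rfl | ht''
      · constructor
        · simpa using fun hnil => h2 (by simp [hnil])
        · intro c' hc'; exact hcur c' (List.mem_reverse.mp hc')
      · exact hacc t' ht''
    · refine ih (c :: cur) acc ?_ hacc t ht
      intro c' hc'
      rcases List.mem_cons.mp hc' with rfl | hc''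
      · simpa using h1
      · exact hcur c' hc''

theorem pvSplit₀_toks (cs : List Char) :
    ∀ t ∈ PySem.Chars.split₀ cs, t ≠ [] ∧ ∀ c ∈ t, PySem.Chars.isspace c = false := by
  intro t ht
  exact pvSplit₀_go_toks cs [] [] (by simp) (by simp) t ht

-- a " "-join of nonempty whitespace-free tokens ends with a non-whitespace character
theorem pvJoin_concat_form : ∀ (ts : List (List Char)), ts ≠ [] →
    (∀ t ∈ ts, t ≠ [] ∧ ∀ c ∈ t, PySem.Chars.isspace c = false) →
    ∃ z c, PySem.Chars.join [' '] ts = z ++ [c] ∧ PySem.Chars.isspace c = false := by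
  intro ts
  induction ts with
  | nil => intro h; exact absurd rfl h
  | cons a rest ih =>
    intro _ htoks
    cases rest with
    | nil =>
      rcases List.eq_nil_or_concat a with rfl | ⟨z, c, hzc⟩
      · exact absurd rfl (htoks [] (by simp)).1
      · rw [List.concat_eq_append] at hzc
        subst hzc
        refine ⟨z, c, ?_, ?_⟩
        · exact PySem.Chars.join_singleton [' '] (z ++ [c])
        · exact (htoks (z ++ [c]) (List.mem_singleton_self _)).2 c (by simp)
    | cons b rest' =>
      rcases ih (by simp) (fun t ht => htoks t (List.mem_cons_of_mem _ ht)) with ⟨z, c, hz, hc⟩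
      refine ⟨a ++ [' '] ++ z, c, ?_, hc⟩
      rw [PySem.Chars.join_cons_cons, hz]
      simp

theorem pvRstrip_concat (z : List Char) (c : Char) (hc : PySem.Chars.isspace c = false) :
    PySem.Chars.rstrip (z ++ [c]) = z ++ [c] := by
  simp [PySem.Chars.rstrip, hc]

theorem pvRstrip_concat_space (z : List Char) (c : Char)
    (hc : PySem.Chars.isspace c = false) :
    PySem.Chars.rstrip ((z ++ [c]) ++ [' ']) = z ++ [c] := by
  have hs : PySem.Chars.isspace ' ' = true := by decide
  simp [PySem.Chars.rstrip, List.dropWhile, hc, hs]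

theorem pvJoin_concat (sep : List Char) (init : List (List Char)) (last : List Char)
    (h : init ≠ []) :
    PySem.Chars.join sep (init ++ [last]) = PySem.Chars.join sep init ++ sep ++ last := by
  induction init with
  | nil => exact absurd rfl h
  | cons a rest ih =>
    cases rest with
    | nil =>
      simp [PySem.Chars.join_cons_cons, PySem.Chars.join_singleton]
    | cons b r' =>
      have h2 : (a :: b :: r') ++ [last] = a :: b :: (r' ++ [last]) := by simp
      have h3 : b :: (r' ++ [last]) = (b :: r') ++ [last] := by simp
      rw [h2, PySem.Chars.join_cons_cons, h3, ih (by simp), PySem.Chars.join_cons_cons]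
      simp

-- main tail lemma: A's whole-string cleanup equals B's token-level cleanup
theorem pvTail_eq (ts : List (List Char))
    (htoks : ∀ t ∈ ts, t ≠ [] ∧ ∀ c ∈ t, PySem.Chars.isspace c = false) :
    PySem.Chars.rstrip (pvRstripComma (PySem.Chars.join [' '] ts)) =
    PySem.Chars.join [' ']
      (match ts.getLast? with
       | none => ts
       | some last =>
         let last' := (last.reverse.dropWhile (· == ',')).reverse
         if last' = [] then ts.dropLast else ts.dropLast ++ [last']) := by
  rcases List.eq_nil_or_concat ts with rfl | ⟨init, last, hts⟩
  · simp [PySem.Chars.join_nil, pvRstripComma, PySem.Chars.rstrip]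
  · rw [List.concat_eq_append] at hts
    subst hts
    have hlast := htoks last (by simp)
    set last' : List Char := (last.reverse.dropWhile (· == ',')).reverse with hlast'
    have hlast'sub : ∀ c ∈ last', PySem.Chars.isspace c = false := by
      intro c hc
      rw [hlast', List.mem_reverse] at hc
      exact hlast.2 c (List.mem_reverse.mp ((List.dropWhile_sublist (· == ',')).mem hc))
    simp only [List.getLast?_concat, List.dropLast_concat]
    by_cases hinit : init = []
    · subst hinit
      simp only [List.nil_append, PySem.Chars.join_singleton]
      have hcomma : pvRstripComma last = last' := rfl
      rw [hcomma]
      by_cases h' : last' = []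
      · rw [if_pos h', h']
        simp [PySem.Chars.rstrip, PySem.Chars.join_nil]
      · rcases List.eq_nil_or_concat last' with h'' | ⟨z, c, hzc⟩
        · exact absurd h'' h'
        · rw [List.concat_eq_append] at hzc
          have hcz : PySem.Chars.isspace c = false := hlast'sub c (by rw [hzc]; simp)
          rw [if_neg h', PySem.Chars.join_singleton, hzc, pvRstrip_concat z c hcz, ← hlast']
          exact hzc.symm
    · have hX := pvJoin_concat_form init hinit (fun t ht => htoks t (by simp [ht]))
      rcases hX with ⟨z, c, hz, hc⟩
      rw [pvJoin_concat [' '] init last hinit]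
      have hrc : pvRstripComma (PySem.Chars.join [' '] init ++ [' '] ++ last) =
          if last' = [] then PySem.Chars.join [' '] init ++ [' ']
          else PySem.Chars.join [' '] init ++ [' '] ++ last' := by
        unfold pvRstripComma
        rw [List.reverse_append, List.reverse_append, List.dropWhile_append]
        have hsp : ((' ' : Char) == ',') = false := by decide
        by_cases h' : last' = []
        · have : (last.reverse.dropWhile (· == ',')).isEmpty = true := by
            rw [List.isEmpty_iff]
            have := congrArg List.reverse h'
            simpa [hlast'] using this
          rw [if_pos this]
          simp [hsp, h']
        · have : ¬ (last.reverse.dropWhile (· == ',')).isEmpty = true := by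
            rw [List.isEmpty_iff]
            intro hh
            exact h' (by rw [hlast', hh]; rfl)
          rw [if_neg this]
          have hrev : last.reverse.dropWhile (· == ',') = last'.reverse := by
            rw [hlast', List.reverse_reverse]
          rw [hrev, if_neg h']
          simp
      rw [hrc]
      by_cases h' : last' = []
      · rw [if_pos h', if_pos h', hz, pvRstrip_concat_space z c hc]
      · rw [if_neg h', if_neg h']
        rcases List.eq_nil_or_concat last' with h'' | ⟨z2, c2, hzc2⟩
        · exact absurd h'' h'
        · rw [List.concat_eq_append] at hzc2
          have hc2 : PySem.Chars.isspace c2 = false := hlast'sub c2 (by rw [hzc2]; simp)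
          rw [pvJoin_concat [' '] init last' hinit, hzc2, ← List.append_assoc,
            pvRstrip_concat _ c2 hc2]

-- ===== VERDICT (by name: the statement is the Claim_ definition above) =====
theorem trim_description_end_py_spec : Claim_equal_trim_description_end_py := by
  intro desc _
  unfold Spec_trim_description_end_py trim_description_end_py trim_description_end_py_alt
  simp only []
  set cs := desc.toList with hcs
  have hidx := pvEndIndex_eq pvSeps cs
  have hA : [(":param ").toList, (":returns:").toList, (":raises:").toList,
      ("defaults to ").toList] = pvSeps := rfl
  rw [hA, hidx, PySem.List.slice_to_natCast, ← pvBScan_eq_take]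
  rw [pvTail_eq (PySem.Chars.split₀ (pvBScan pvSeps cs)) (pvSplit₀_toks _)]
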